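-- pv_equiv track=rewrite | github.com/liv-yaa/Py_Code_Challenges | PractceCodesignal.py | digitDegree
-- ===== SOURCE A (Python) =====
-- def digitDegree(n):
--     # "digit degree": the number of times we need to replace this number with the sum of its digits until we get to a one digit number.
--
--     t = 0 # times
--
--     while True:
--         if len(str(n)) == 1:
--             return t
--
--         n = sum([int(i) for i in str(n)])
--
--         t += 1
--
--         if len(str(n)) == 1:
--             return t
-- ===== SOURCE B (Python) =====
-- def digitDegree(n):
--     # Recursive formulation of the digit-degree recurrence:
--     # 0 for a one-digit number, else 1 + digitDegree(sum of digits).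
--     if len(str(n)) == 1:
--         return 0
--     total = 0
--     for ch in str(n):
--         total += int(ch)
--     return 1 + digitDegree(total)
-- ===== Notes on version B (the rewrite author's own statement) =====
-- stated objective: simpler
-- what changed: A's while-True loop with an explicit counter and a duplicated one-digit test is replaced by a direct recursive definition of the recurrence (0 for one-digit n, else 1 + digitDegree(digit sum)).
import Mathlib
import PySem

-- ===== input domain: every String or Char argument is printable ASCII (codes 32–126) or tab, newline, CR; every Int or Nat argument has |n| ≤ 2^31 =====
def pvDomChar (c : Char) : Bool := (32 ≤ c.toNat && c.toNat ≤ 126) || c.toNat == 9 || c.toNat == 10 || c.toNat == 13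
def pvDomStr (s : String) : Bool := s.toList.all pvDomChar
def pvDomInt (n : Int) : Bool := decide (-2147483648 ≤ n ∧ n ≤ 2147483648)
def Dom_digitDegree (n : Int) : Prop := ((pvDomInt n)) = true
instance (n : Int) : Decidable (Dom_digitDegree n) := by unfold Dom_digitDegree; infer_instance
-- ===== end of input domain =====

-- B replaces A's counter loop by a direct recursion on the digit-degree recurrence (same cost).
-- A raises ValueError on negative n (int('-')); those inputs are excluded by Pre_.

-- ===== PORT A =====
-- sum([int(i) for i in str(n)]); int('-') raises ValueError, which happens only for n < 0
-- (outside Pre_), where .getD 0 stands in for the unreached value.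
def pySumIntDigits (n : Int) : Int :=
  ((PySem.Int.toChars n).map (fun c => (PySem.Int.ofChars? [c]).getD 0)).sum

-- A's while-True loop; the `dite` guard only makes the recursion total (it holds whenever
-- the Python loop continues on an input A accepts).
def digitDegreeLoop (n t : Int) : Int :=
  if PySem.Str.len (PySem.Int.toStr n) == 1 then t
  else
    let m := pySumIntDigits n
    let t' := t + 1
    if PySem.Str.len (PySem.Int.toStr m) == 1 then t'
    else if _h : m.natAbs < n.natAbs then digitDegreeLoop m t' else t'
termination_by n.natAbs

def digitDegree (n : Int) : Int := digitDegreeLoop n 0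

-- ===== PORT B =====
-- B's recursion; `total` accumulated by a for-loop over str(n), as in Source B; the `dite`
-- guard only makes the recursion total.
def digitDegree_alt (n : Int) : Int :=
  if PySem.Str.len (PySem.Int.toStr n) == 1 then 0
  else
    let total := (PySem.Int.toChars n).foldl (fun acc c => acc + (PySem.Int.ofChars? [c]).getD 0) 0
    if h : total.natAbs < n.natAbs then 1 + digitDegree_alt total else 1
termination_by n.natAbs

-- ===== PRECONDITION & SPEC =====
-- A raises ValueError on n < 0 (int('-') on the sign character of str(n)); Pre_ excludes those.
def Pre_digitDegree (n : Int) : Prop := 0 ≤ n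
instance (n : Int) : Decidable (Pre_digitDegree n) := by unfold Pre_digitDegree; infer_instance
def pvWitness_digitDegree : Int := (12)

def Spec_digitDegree (n : Int) (out : Int) : Prop := out = digitDegree_alt n
instance (n : Int) (out : Int) : Decidable (Spec_digitDegree n out) := by unfold Spec_digitDegree; infer_instance

-- ===== CLAIM (what is proved, stated in full; the proofs are below) =====
def Claim_equal_digitDegree : Prop := ∀ (n : Int), Dom_digitDegree n → Pre_digitDegree n → Spec_digitDegree n (digitDegree n)

-- ===== LEMMAS AND PROOFS =====

-- B's for-loop accumulation computes the same digit sum as A's comprehension-sum.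
lemma foldl_digits_eq (cs : List Char) (a : Int) :
    cs.foldl (fun acc c => acc + (PySem.Int.ofChars? [c]).getD 0) a
      = a + (cs.map (fun c => (PySem.Int.ofChars? [c]).getD 0)).sum := by
  induction cs generalizing a with
  | nil => simp
  | cons c cs ih => simp [List.foldl, ih]; ring

-- Loop invariant: A's loop starting at counter t returns t plus B's recursive value.
lemma loop_eq_alt : ∀ (k : Nat) (n t : Int), n.natAbs = k →
    digitDegreeLoop n t = t + digitDegree_alt n := by
  intro k
  induction k using Nat.strong_induction_on with
  | _ k ih =>
    intro n t hk
    have hfold : (PySem.Int.toChars n).foldl (fun acc c => acc + (PySem.Int.ofChars? [c]).getD 0) 0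
        = pySumIntDigits n := by
      rw [foldl_digits_eq, pySumIntDigits]; ring
    rw [digitDegreeLoop, digitDegree_alt]
    simp only [hfold]
    by_cases h1 : (PySem.Str.len (PySem.Int.toStr n) == 1) = true
    · rw [if_pos h1, if_pos h1, add_zero]
    · rw [if_neg h1, if_neg h1]
      by_cases h2 : (PySem.Str.len (PySem.Int.toStr (pySumIntDigits n)) == 1) = true
      · rw [if_pos h2]
        by_cases h3 : (pySumIntDigits n).natAbs < n.natAbs
        · rw [dif_pos h3, digitDegree_alt, if_pos h2]; ring
        · rw [dif_neg h3]
      · rw [if_neg h2]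
        by_cases h3 : (pySumIntDigits n).natAbs < n.natAbs
        · rw [dif_pos h3, dif_pos h3, ih _ (hk ▸ h3) _ (t + 1) rfl]; ring
        · rw [dif_neg h3, dif_neg h3]

-- ===== VERDICT (by name: the statement is the Claim_ definition above) =====
theorem digitDegree_spec : Claim_equal_digitDegree := by
  intro n _ _
  unfold Spec_digitDegree digitDegree
  rw [loop_eq_alt n.natAbs n 0 rfl]
  ring
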